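-- pv_equiv track=rewrite | github.com/kimwin2/stock_test | backend/theme_engine.py | _find_theme_news_hits
-- ===== SOURCE A (Python) =====
-- from typing import Iterable
--
-- def _find_theme_news_hits(theme_name: str, articles: list[dict], stocks: Iterable[str]) -> list[dict]:
--     keywords = [theme_name, *stocks]
--     hits = []
--     for article in articles:
--         title = article.get("title", "")
--         summary = article.get("summary", "")
--         haystack = f"{title} {summary}"
--         if any(keyword and keyword in haystack for keyword in keywords):
--             hits.append({
--                 "title": title,
--                 "url": article.get("url", ""),
--             })
--         if len(hits) >= 5:
--             break
--     return hits
-- ===== SOURCE B (Python) =====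
-- def _find_theme_news_hits(theme_name, articles, stocks):
--     keywords = [k for k in (theme_name, *stocks) if k]
--     hays = [f"{a.get('title', '')} {a.get('summary', '')}" for a in articles]
--     flags = [False] * len(articles)
--     for kw in keywords:
--         flags = [f or (kw in h) for f, h in zip(flags, hays)]
--     hits = []
--     for a, f in zip(articles, flags):
--         if f:
--             hits.append({"title": a.get("title", ""), "url": a.get("url", "")})
--             if len(hits) == 5:
--                 break
--     return hits
-- ===== Notes on version B (the rewrite author's own statement) =====
-- stated objective: alternative
-- what changed: B inverts the loop nesting: it filters empty keywords once, precomputes all haystacks, builds a per-article boolean match-flag vector with one zip-OR pass per keyword, then collects the first five flagged articles, instead of A's per-article scan over all keywords with an inline any().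
import Mathlib
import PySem

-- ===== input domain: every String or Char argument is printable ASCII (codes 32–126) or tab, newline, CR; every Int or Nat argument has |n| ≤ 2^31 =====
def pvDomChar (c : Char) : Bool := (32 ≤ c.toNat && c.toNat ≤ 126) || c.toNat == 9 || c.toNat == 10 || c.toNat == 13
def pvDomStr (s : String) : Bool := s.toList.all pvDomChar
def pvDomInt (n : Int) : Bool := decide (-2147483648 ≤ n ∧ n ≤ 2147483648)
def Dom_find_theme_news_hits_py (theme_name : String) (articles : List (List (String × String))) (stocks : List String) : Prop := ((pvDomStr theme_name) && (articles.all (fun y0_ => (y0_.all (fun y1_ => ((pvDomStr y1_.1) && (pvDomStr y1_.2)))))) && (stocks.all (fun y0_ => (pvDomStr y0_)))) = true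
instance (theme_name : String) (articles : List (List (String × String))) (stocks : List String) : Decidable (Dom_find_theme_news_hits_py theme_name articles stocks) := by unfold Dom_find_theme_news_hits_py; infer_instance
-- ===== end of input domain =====

-- B inverts the loops: it precomputes the haystacks once, builds a per-article match-flag
-- vector by OR-ing one pass per keyword, then collects the first five flagged articles
-- (objective: alternative — same cost, genuinely different traversal).

-- ===== PORT A =====
-- the 'for article in articles' loop of A, with the running 'hits' accumulator and the break at 5
def pvLoopA (keywords : List String) : List (List (String × String)) → List (List (String × String)) → List (List (String × String))
  | [], hits => hits
  | article :: rest, hits =>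
    let title := PySem.Dict.getD ⟨article⟩ "title" ""
    let summary := PySem.Dict.getD ⟨article⟩ "summary" ""
    let haystack := title ++ " " ++ summary
    let hits' := if keywords.any (fun keyword => !(keyword == "") && PySem.Str.isIn keyword haystack)
                 then hits ++ [[("title", title), ("url", PySem.Dict.getD ⟨article⟩ "url" "")]]
                 else hits
    if hits'.length ≥ 5 then hits' else pvLoopA keywords rest hits'

def find_theme_news_hits_py (theme_name : String) (articles : List (List (String × String))) (stocks : List String) : List (List (String × String)) :=
  let keywords := theme_name :: stocks
  pvLoopA keywords articles []

-- ===== PORT B =====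
-- f"{a.get('title','')} {a.get('summary','')}"
def pvHay (a : List (String × String)) : String :=
  PySem.Dict.getD ⟨a⟩ "title" "" ++ " " ++ PySem.Dict.getD ⟨a⟩ "summary" ""

-- {"title": a.get("title",""), "url": a.get("url","")}
def pvMk (a : List (String × String)) : List (String × String) :=
  [("title", PySem.Dict.getD ⟨a⟩ "title" ""), ("url", PySem.Dict.getD ⟨a⟩ "url" "")]

-- B's second loop: collect the flagged articles, break when 5 are gathered
def pvCollect : List ((List (String × String)) × Bool) → List (List (String × String)) → List (List (String × String))
  | [], hits => hits
  | (a, f) :: rest, hits =>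
    if f then
      let hits' := hits ++ [pvMk a]
      if hits'.length == 5 then hits' else pvCollect rest hits'
    else pvCollect rest hits

def find_theme_news_hits_py_alt (theme_name : String) (articles : List (List (String × String))) (stocks : List String) : List (List (String × String)) :=
  let keywords := (theme_name :: stocks).filter (fun k => !(k == ""))
  let hays := articles.map pvHay
  let flags := keywords.foldl
    (fun fs kw => List.zipWith (fun f h => f || PySem.Str.isIn kw h) fs hays)
    (List.replicate articles.length false)
  pvCollect (articles.zip flags) []

-- ===== PRECONDITION & SPEC =====
def Spec_find_theme_news_hits_py (theme_name : String) (articles : List (List (String × String))) (stocks : List String) (out : List (List (String × String))) : Prop := out = find_theme_news_hits_py_alt theme_name articles stocks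
instance (theme_name : String) (articles : List (List (String × String))) (stocks : List String) (out : List (List (String × String))) : Decidable (Spec_find_theme_news_hits_py theme_name articles stocks out) := by unfold Spec_find_theme_news_hits_py; infer_instance

-- ===== CLAIM (what is proved, stated in full; the proofs are below) =====
def Claim_equal_find_theme_news_hits_py : Prop := ∀ (theme_name : String) (articles : List (List (String × String))) (stocks : List String), Dom_find_theme_news_hits_py theme_name articles stocks → Spec_find_theme_news_hits_py theme_name articles stocks (find_theme_news_hits_py theme_name articles stocks)

-- ===== LEMMAS AND PROOFS =====

-- the per-article predicate A evaluates, as a function of the keyword list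
def pvPred (keywords : List String) (a : List (String × String)) : Bool :=
  keywords.any (fun kw => !(kw == "") && PySem.Str.isIn kw (pvHay a))

-- zipWith with the same right list twice composes pointwise
lemma pv_zipWith_zipWith {α β : Type} (g g' : β → α → β) (fs : List β) (hs : List α) :
    List.zipWith g (List.zipWith g' fs hs) hs = List.zipWith (fun f h => g (g' f h) h) fs hs := by
  induction fs generalizing hs with
  | nil => simp
  | cons f fs ih => cases hs <;> simp [ih]

lemma pv_zipWith_id {α : Type} (fs : List Bool) (hs : List α) (h : fs.length = hs.length) :
    List.zipWith (fun f _ => f) fs hs = fs := by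
  induction fs generalizing hs with
  | nil => simp
  | cons f fs ih => cases hs with
    | nil => simp at h
    | cons x hs => simp at h; simp [ih hs h]

-- the keyword fold builds the pointwise OR of all keyword tests
lemma pv_flags_fold (c : String → String → Bool) (kws : List String) (hs : List String)
    (fs : List Bool) (hlen : fs.length = hs.length) :
    kws.foldl (fun fs kw => List.zipWith (fun f h => f || c kw h) fs hs) fs
      = List.zipWith (fun f h => f || kws.any (fun kw => c kw h)) fs hs := by
  induction kws generalizing fs with
  | nil =>
    simp only [List.foldl_nil, List.any_nil, Bool.or_false]
    exact (pv_zipWith_id fs hs hlen).symm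
  | cons kw kws ih =>
    rw [List.foldl_cons, ih _ (by simp [hlen]), pv_zipWith_zipWith]
    simp [Bool.or_assoc]

lemma pv_flags_replicate {α : Type} (q : α → Bool) (hs : List α) :
    List.zipWith (fun f h => f || q h) (List.replicate hs.length false) hs = hs.map q := by
  induction hs with
  | nil => simp
  | cons h hs ih => simp [List.replicate_succ, ih]

-- articles paired with their own flags
lemma pv_zip_map {α β : Type} (f : α → β) (xs : List α) :
    xs.zip (xs.map f) = xs.map (fun x => (x, f x)) := by
  induction xs with
  | nil => rfl
  | cons x xs ih => simp [ih]

-- the two loops agree as long as fewer than 5 hits are collected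
lemma pv_loop_eq (kws : List String) (arts : List (List (String × String)))
    (hits : List (List (String × String))) (hlt : hits.length < 5) :
    pvLoopA kws arts hits = pvCollect (arts.map (fun a => (a, pvPred kws a))) hits := by
  induction arts generalizing hits with
  | nil => simp [pvLoopA, pvCollect]
  | cons a rest ih =>
    rw [List.map_cons]
    show (let hits' := if pvPred kws a then hits ++ [pvMk a] else hits;
          if hits'.length ≥ 5 then hits' else pvLoopA kws rest hits') = _
    by_cases hp : pvPred kws a
    · simp only [hp, if_true, pvCollect]
      by_cases h4 : hits.length = 4
      · simp [h4]
      · have t1 : ¬ (hits ++ [pvMk a]).length ≥ 5 := by simp; omega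
        have t2 : ¬ ((hits ++ [pvMk a]).length == 5) = true := by simp; omega
        simp only [t1, t2, Bool.false_eq_true, if_false]
        exact ih _ (by simp; omega)
    · simp only [hp, Bool.false_eq_true, if_false, pvCollect]
      have t1 : ¬ (hits.length ≥ 5) := by omega
      simp only [t1, if_false]
      exact ih _ hlt

-- ===== VERDICT (by name: the statement is the Claim_ definition above) =====
theorem find_theme_news_hits_py_spec : Claim_equal_find_theme_news_hits_py := by
  intro theme_name articles stocks _
  unfold Spec_find_theme_news_hits_py
  simp only [find_theme_news_hits_py, find_theme_news_hits_py_alt]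
  rw [pv_flags_fold _ _ _ _ (by simp),
      show articles.length = (articles.map pvHay).length by simp,
      pv_flags_replicate, List.map_map, pv_zip_map]
  have hfun : ∀ x : List (String × String),
      (x, ((fun h => ((theme_name :: stocks).filter (fun k => !(k == ""))).any
              (fun kw => PySem.Str.isIn kw h)) ∘ pvHay) x)
        = (x, pvPred (theme_name :: stocks) x) := by
    intro x; simp [pvPred, Function.comp, List.any_filter]
  rw [List.map_congr_left (fun x _ => hfun x)]
  exact pv_loop_eq _ _ _ (by simp)
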